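-- pv_equiv track=rewrite | github.com/maxcohen31/Codewars-Solutions | Codewars/Find_All_Pairs_7_kyu.py | duplicates
-- ===== SOURCE A (Python) =====
-- from collections import Counter
--
-- def duplicates(arr):
--     count = 0
--     new = Counter(arr)
--
--     for k, v in new.items():
--         if v >= 2 and v % 2 == 0:
--             count += v // 2
--         elif v >= 2 and v % 2 != 0:
--             count += v // 2
--     return count
-- ===== SOURCE B (Python) =====
-- def duplicates(arr):
--     seen = set()
--     count = 0
--     for x in arr:
--         if x in seen:
--             seen.discard(x)
--             count += 1
--         else:
--             seen.add(x)
--     return count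
-- ===== Notes on version B (the rewrite author's own statement) =====
-- stated objective: idiomatic
-- what changed: Replaces the build-a-full-Counter-then-sum-v//2 pass with a single pass that toggles each element in a `seen` set and counts a pair the moment it is completed.
import Mathlib
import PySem

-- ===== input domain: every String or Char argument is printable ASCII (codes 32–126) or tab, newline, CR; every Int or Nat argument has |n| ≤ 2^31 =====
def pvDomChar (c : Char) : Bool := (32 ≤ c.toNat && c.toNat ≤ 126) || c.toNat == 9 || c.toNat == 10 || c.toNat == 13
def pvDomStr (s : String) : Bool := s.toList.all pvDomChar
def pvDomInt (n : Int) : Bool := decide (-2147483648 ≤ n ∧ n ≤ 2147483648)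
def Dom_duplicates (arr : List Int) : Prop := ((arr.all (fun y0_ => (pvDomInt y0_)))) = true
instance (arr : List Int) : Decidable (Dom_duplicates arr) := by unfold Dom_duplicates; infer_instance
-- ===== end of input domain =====

-- B replaces Counter-then-sum-v//2 with a single pass toggling a `seen` set, counting each pair as it completes (idiomatic, same cost).


-- ===== PORT A =====
-- count = 0; new = Counter(arr); for k, v in new.items(): if v>=2 and v%2==0: count += v//2 elif v>=2 and v%2!=0: count += v//2
def duplicates (arr : List Int) : Int :=
  (PySem.Dict.counter arr).items.foldl
    (fun count kv =>
      if 2 ≤ kv.2 ∧ PySem.Int.mod kv.2 2 = 0 then count + PySem.Int.floordiv kv.2 2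
      else if 2 ≤ kv.2 ∧ PySem.Int.mod kv.2 2 ≠ 0 then count + PySem.Int.floordiv kv.2 2
      else count) 0

-- ===== PORT B =====
-- seen = set(); count = 0; for x in arr: if x in seen: seen.discard(x); count += 1 else: seen.add(x); return count
def duplicates_alt (arr : List Int) : Int :=
  (arr.foldl
    (fun (st : PySem.Set Int × Int) x =>
      if x ∈ st.1 then (PySem.Set.discard st.1 x, st.2 + 1)
      else (PySem.Set.add st.1 x, st.2))
    (PySem.Set.empty, 0)).2

-- ===== PRECONDITION & SPEC =====
def Spec_duplicates (arr : List Int) (out : Int) : Prop := out = duplicates_alt arr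
instance (arr : List Int) (out : Int) : Decidable (Spec_duplicates arr out) := by unfold Spec_duplicates; infer_instance

-- ===== CLAIM (what is proved, stated in full; the proofs are below) =====
def Claim_equal_duplicates : Prop := ∀ (arr : List Int), Dom_duplicates arr → Spec_duplicates arr (duplicates arr)

-- ===== LEMMAS AND PROOFS =====

-- the number of pairs among `arr`, with the parity debt `s` (the seen set), tallied over the key list K
def pairSum (arr s K : List Int) : Int :=
  (K.map (fun k => (((arr.count k + (if k ∈ s then 1 else 0)) / 2 : Nat) : Int))).sum

-- sums over a Nodup list of two functions agreeing everywhere except at x, where they differ by d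
theorem sum_map_single_diff (f g : Int → Int) (x d : Int)
    (hfx : f x = g x + d) (h : ∀ k, k ≠ x → f k = g k) :
    ∀ K : List Int, K.Nodup → x ∈ K → (K.map f).sum = (K.map g).sum + d := by
  intro K
  induction K with
  | nil => intro _ hx; cases hx
  | cons a t ih =>
    intro hK hx
    have ha : a ∉ t := (List.nodup_cons.mp hK).1
    have ht : t.Nodup := (List.nodup_cons.mp hK).2
    rcases List.mem_cons.mp hx with rfl | hxt
    · have hmap : t.map f = t.map g :=
        List.map_congr_left (fun k hk => h k (fun e => ha (e ▸ hk)))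
      rw [List.map_cons, List.map_cons, List.sum_cons, List.sum_cons, hmap, hfx]; ring
    · have hax : a ≠ x := fun e => ha (e ▸ hxt)
      rw [List.map_cons, List.map_cons, List.sum_cons, List.sum_cons, h a hax, ih ht hxt]; ring

theorem loop_inv (arr : List Int) : ∀ (s : List Int) (c : Int) (K : List Int),
    s.Nodup → K.Nodup → (∀ k ∈ s, k ∈ K) → (∀ k ∈ arr, k ∈ K) →
    (arr.foldl
      (fun (st : PySem.Set Int × Int) x =>
        if x ∈ st.1 then (PySem.Set.discard st.1 x, st.2 + 1)
        else (PySem.Set.add st.1 x, st.2)) (s, c)).2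
      = c + pairSum arr s K := by
  induction arr with
  | nil =>
    intro s c K _ _ _ _
    have : ∀ k ∈ K, (((List.count k ([] : List Int) + (if k ∈ s then 1 else 0)) / 2 : Nat) : Int) = 0 := by
      intro k _; split <;> simp
    simp only [List.foldl_nil, pairSum]
    rw [List.sum_eq_zero (by intro y hy; rcases List.mem_map.mp hy with ⟨k, hk, rfl⟩; exact this k hk)]
    ring
  | cons x t ih =>
    intro s c K hs hK hsK haK
    by_cases hx : x ∈ s
    · rw [List.foldl_cons]
      simp only [if_pos hx]
      rw [ih (PySem.Set.discard s x) (c + 1) K (PySem.Set.nodup_discard s x hs) hK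
            (fun k hk => hsK k ((PySem.Set.mem_discard s x k).mp hk).1)
            (fun k hk => haK k (List.mem_cons_of_mem _ hk))]
      have hsum : pairSum (x :: t) s K = pairSum t (PySem.Set.discard s x) K + 1 := by
        unfold pairSum
        apply sum_map_single_diff _ _ x 1 ?hfx ?hne K hK (haK x List.mem_cons_self)
        case hfx =>
          have hxd : x ∉ PySem.Set.discard s x := fun h0 => ((PySem.Set.mem_discard s x x).mp h0).2 rfl
          simp only [if_pos hx, if_neg hxd, List.count_cons_self]
          have h2 : (List.count x t + 1 + 1) / 2 = (List.count x t + 0) / 2 + 1 := by omega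
          rw [h2]; push_cast; ring
        case hne =>
          intro k hkx
          have hmem : k ∈ PySem.Set.discard s x ↔ k ∈ s := by
            rw [PySem.Set.mem_discard]; exact ⟨fun h0 => h0.1, fun h0 => ⟨h0, hkx⟩⟩
          simp [List.count_cons, Ne.symm hkx, hmem]
      rw [hsum]; ring
    · rw [List.foldl_cons]
      simp only [if_neg hx]
      rw [ih (PySem.Set.add s x) c K (PySem.Set.nodup_add s x hs) hK
            (fun k hk => by
              rcases (PySem.Set.mem_add s x k).mp hk with h0 | rfl
              · exact hsK k h0
              · exact haK k List.mem_cons_self)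
            (fun k hk => haK k (List.mem_cons_of_mem _ hk))]
      have hsum : pairSum (x :: t) s K = pairSum t (PySem.Set.add s x) K := by
        unfold pairSum
        refine congrArg List.sum (List.map_congr_left ?_)
        intro k _
        by_cases hkx : k = x
        · subst hkx
          simp [hx, List.count_cons_self]
        · have hm : k ∈ PySem.Set.add s x ↔ k ∈ s := by
            rw [PySem.Set.mem_add]
            exact ⟨fun h0 => h0.resolve_right hkx, Or.inl⟩
          simp [List.count_cons, Ne.symm hkx, hm]
      rw [hsum]

-- A's fold over Counter items is the sum of count//2 over the distinct elements
theorem foldA (arr : List Int) : ∀ (K : List Int) (c : Int), (∀ k ∈ K, 1 ≤ arr.count k) →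
    (K.map (fun k => (k, (arr.count k : Int)))).foldl
      (fun count kv =>
        if 2 ≤ kv.2 ∧ PySem.Int.mod kv.2 2 = 0 then count + PySem.Int.floordiv kv.2 2
        else if 2 ≤ kv.2 ∧ PySem.Int.mod kv.2 2 ≠ 0 then count + PySem.Int.floordiv kv.2 2
        else count) c
    = c + pairSum arr [] K := by
  intro K
  induction K with
  | nil => exact fun c _ => by simp [pairSum]
  | cons k t ih =>
    intro c hpos
    have h1 : 1 ≤ arr.count k := hpos k List.mem_cons_self
    have hfd : PySem.Int.floordiv (arr.count k : Int) 2 = ((arr.count k / 2 : Nat) : Int) := by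
      exact_mod_cast PySem.Int.floordiv_natCast (arr.count k) 2
    have hstep : (if 2 ≤ (arr.count k : Int) ∧ PySem.Int.mod (arr.count k : Int) 2 = 0
          then c + PySem.Int.floordiv (arr.count k : Int) 2
          else if 2 ≤ (arr.count k : Int) ∧ PySem.Int.mod (arr.count k : Int) 2 ≠ 0
          then c + PySem.Int.floordiv (arr.count k : Int) 2
          else c) = c + ((arr.count k / 2 : Nat) : Int) := by
      by_cases h2 : 2 ≤ (arr.count k : Int)
      · by_cases hm : PySem.Int.mod (arr.count k : Int) 2 = 0
        · rw [if_pos ⟨h2, hm⟩, hfd]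
        · rw [if_neg (fun hc => hm hc.2), if_pos ⟨h2, hm⟩, hfd]
      · have hone : arr.count k = 1 := by omega
        rw [hone]
        norm_num
    simp only [List.map_cons, List.foldl_cons, hstep]
    rw [ih (c + ((arr.count k / 2 : Nat) : Int)) (fun y hy => hpos y (List.mem_cons_of_mem _ hy))]
    simp only [pairSum, List.map_cons, List.sum_cons]
    simp
    ring
theorem dupA_eq (arr : List Int) :
    duplicates arr = pairSum arr [] (PySem.Set.ofList arr) := by
  unfold duplicates
  rw [PySem.Dict.items_counter]
  rw [foldA arr (PySem.Set.ofList arr) 0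
        (fun k hk => List.count_pos_iff.mpr ((PySem.Set.mem_ofList arr k).mp hk))]
  ring

theorem duplicates_eq_alt (arr : List Int) : duplicates arr = duplicates_alt arr := by
  rw [dupA_eq]
  unfold duplicates_alt PySem.Set.empty
  rw [loop_inv arr [] 0 (PySem.Set.ofList arr) List.nodup_nil (PySem.Set.nodup_ofList arr)
        (by simp) (fun k hk => (PySem.Set.mem_ofList arr k).mpr hk)]
  ring

-- ===== VERDICT (by name: the statement is the Claim_ definition above) =====
theorem duplicates_spec : Claim_equal_duplicates := by
  intro arr _
  unfold Spec_duplicates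
  exact duplicates_eq_alt arr
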